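-- pv_equiv track=rewrite | github.com/yunhao-037/sutd-academic-projects | Down For Laundry/DFL_ML.py | column_maker
-- ===== SOURCE A (Python) =====
-- def column_maker(prev, now):
--     column = []
--     for i in range(60 * 24 + 1):
--         if now > prev:
--             if i >= prev and i <= now:
--                 column.append(1)
--             else:
--                 column.append(0)
--         elif now <= prev:
--             if i >= prev or i <= now:
--                 column.append(1)
--             else:
--                 column.append(0)
--     return column
-- ===== SOURCE B (Python) =====
-- def column_maker(prev, now):
--     n = 60 * 24 + 1
--     if now > prev:
--         lo = min(max(prev, 0), n)
--         hi = min(max(now + 1, 0), n)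
--         return [0] * lo + [1] * (hi - lo) + [0] * (n - hi)
--     else:
--         head = min(max(now + 1, 0), n)
--         tail = min(max(prev, 0), n)
--         if tail <= head:
--             return [1] * n
--         return [1] * head + [0] * (tail - head) + [1] * (n - tail)
-- ===== Notes on version B (the rewrite author's own statement) =====
-- stated objective: simpler
-- what changed: Replaces the 1441-iteration per-index membership-test loop with direct construction: the region boundaries are clamped once and the mask is built by concatenating three constant blocks.
import Mathlib
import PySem

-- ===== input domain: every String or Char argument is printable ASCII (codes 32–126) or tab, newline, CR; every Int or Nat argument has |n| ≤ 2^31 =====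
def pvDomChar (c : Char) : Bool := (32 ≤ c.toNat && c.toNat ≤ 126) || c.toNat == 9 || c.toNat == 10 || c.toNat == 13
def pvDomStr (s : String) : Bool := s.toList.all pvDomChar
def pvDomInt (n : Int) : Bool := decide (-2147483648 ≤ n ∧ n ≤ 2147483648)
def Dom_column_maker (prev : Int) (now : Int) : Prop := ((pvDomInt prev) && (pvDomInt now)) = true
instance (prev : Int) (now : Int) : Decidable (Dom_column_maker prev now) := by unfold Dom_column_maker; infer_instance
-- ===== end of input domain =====

-- B builds the 1441-slot mask by concatenating three constant blocks computed from
-- clamped region boundaries instead of testing every minute index (objective: simpler).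

-- ===== PORT A =====
-- literal port of A: loop over range(60*24+1) appending 1/0 after a per-index test
def column_maker (prev : Int) (now : Int) : List Int :=
  (PySem.List.pyRange 0 (60 * 24 + 1) 1).foldl
    (fun column i =>
      if now > prev then
        column ++ [if i ≥ prev ∧ i ≤ now then (1 : Int) else 0]
      else if now ≤ prev then
        column ++ [if i ≥ prev ∨ i ≤ now then (1 : Int) else 0]
      else column) []

-- ===== PORT B =====
-- literal port of B: block construction from clamped boundaries
def column_maker_alt (prev : Int) (now : Int) : List Int :=
  let n : Int := 60 * 24 + 1
  if now > prev then
    let lo := min (max prev 0) n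
    let hi := min (max (now + 1) 0) n
    List.replicate lo.toNat 0 ++ List.replicate (hi - lo).toNat 1 ++ List.replicate (n - hi).toNat 0
  else
    let head := min (max (now + 1) 0) n
    let tail := min (max prev 0) n
    if tail ≤ head then List.replicate n.toNat 1
    else List.replicate head.toNat 1 ++ List.replicate (tail - head).toNat 0 ++ List.replicate (n - tail).toNat 1

-- ===== PRECONDITION & SPEC =====
def Spec_column_maker (prev : Int) (now : Int) (out : List Int) : Prop := out = column_maker_alt prev now
instance (prev : Int) (now : Int) (out : List Int) : Decidable (Spec_column_maker prev now out) := by unfold Spec_column_maker; infer_instance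

-- ===== CLAIM (what is proved, stated in full; the proofs are below) =====
def Claim_equal_column_maker : Prop := ∀ (prev : Int) (now : Int), Dom_column_maker prev now → Spec_column_maker prev now (column_maker prev now)

-- ===== LEMMAS AND PROOFS =====

set_option maxRecDepth 8192

-- three constant blocks written as a single map over an index range
lemma pv_blocks (p q r : Nat) (x y z : Int) :
    List.replicate p x ++ (List.replicate q y ++ List.replicate r z)
    = (List.range (p + q + r)).map (fun k => if k < p then x else if k < p + q then y else z) := by
  apply List.ext_getElem
  · simp; omega
  · intro k h1 h2
    simp only [List.getElem_map, List.getElem_range]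
    rcases Nat.lt_or_ge k p with h | h
    · rw [List.getElem_append_left (by simpa using h)]
      simp [h]
    · rw [List.getElem_append_right (by simpa using h)]
      rcases Nat.lt_or_ge k (p + q) with h' | h'
      · rw [List.getElem_append_left (by simp; omega)]
        simp; omega
      · rw [List.getElem_append_right (by simp; omega)]
        simp; omega

lemma pv_A_eq_map (prev now : Int) :
    column_maker prev now
    = (List.range 1441).map (fun (k : Nat) =>
        if now > prev then (if prev ≤ (k : Int) ∧ (k : Int) ≤ now then (1 : Int) else 0)
        else (if prev ≤ (k : Int) ∨ (k : Int) ≤ now then (1 : Int) else 0)) := by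
  unfold column_maker
  have hbody : (fun (column : List Int) (i : Int) =>
      if now > prev then
        column ++ [if i ≥ prev ∧ i ≤ now then (1 : Int) else 0]
      else if now ≤ prev then
        column ++ [if i ≥ prev ∨ i ≤ now then (1 : Int) else 0]
      else column)
      = fun column i => column ++
        [if now > prev then (if prev ≤ i ∧ i ≤ now then (1 : Int) else 0)
         else (if prev ≤ i ∨ i ≤ now then (1 : Int) else 0)] := by
    funext column i
    by_cases h : now > prev
    · simp [h, ge_iff_le]
    · have h' : now ≤ prev := by omega
      simp [h, h', ge_iff_le]
  rw [hbody, PySem.List.foldl_append_singleton_eq_map, PySem.List.pyRange_one, List.map_map]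
  rw [show ((60 * 24 + 1 - 0 : Int)).toNat = 1441 by simp]
  simp only [List.nil_append, Function.comp_def]
  apply List.map_congr_left
  intro k _
  simp

-- ===== VERDICT (by name: the statement is the Claim_ definition above) =====
theorem column_maker_spec : Claim_equal_column_maker := by
  intro prev now _
  unfold Spec_column_maker column_maker_alt
  rw [pv_A_eq_map]
  by_cases h : now > prev
  · rw [if_pos h]
    set lo := min (max prev 0) (60 * 24 + 1 : Int) with hlo
    set hi := min (max (now + 1) 0) (60 * 24 + 1 : Int) with hhi
    rw [List.append_assoc, pv_blocks]
    have hlen : lo.toNat + (hi - lo).toNat + (1441 - hi).toNat = 1441 := by omega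
    rw [show (60 * 24 + 1 - hi : Int).toNat = (1441 - hi).toNat by norm_num, hlen]
    apply List.map_congr_left
    intro k hk
    simp only [List.mem_range] at hk
    rw [if_pos h]
    split_ifs <;> omega
  · rw [if_neg h]
    set head := min (max (now + 1) 0) (60 * 24 + 1 : Int) with hhead
    set tail := min (max prev 0) (60 * 24 + 1 : Int) with htail
    by_cases ht : tail ≤ head
    · rw [if_pos ht]
      have hrep : List.replicate ((60 * 24 + 1 : Int)).toNat (1 : Int)
          = (List.range 1441).map (fun _ => (1 : Int)) := by
        rw [show ((60 * 24 + 1 : Int)).toNat = 1441 by simp]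
        simp [List.map_const']
      rw [hrep]
      apply List.map_congr_left
      intro k hk
      simp only [List.mem_range] at hk
      rw [if_neg h]
      split_ifs <;> omega
    · rw [if_neg ht]
      rw [List.append_assoc, pv_blocks]
      have hlen : head.toNat + (tail - head).toNat + (1441 - tail).toNat = 1441 := by omega
      rw [show (60 * 24 + 1 - tail : Int).toNat = (1441 - tail).toNat by norm_num, hlen]
      apply List.map_congr_left
      intro k hk
      simp only [List.mem_range] at hk
      rw [if_neg h]
      split_ifs <;> omega
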